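-- pv_equiv track=rewrite | github.com/Global-Cyber-Associates/rtool | agent-admin/functions/network_vulnscan.py | heuristic_flags
-- ===== SOURCE A (Python) =====
-- def heuristic_flags(host_entry):
--     findings = []
--     open_ports = host_entry.get("open_ports", {})
--
--     def add(desc, impact):
--         findings.append({"description": desc, "impact": impact})
--
--     if 445 in open_ports:
--         add("SMB open (445) — possible SMBv1 risks.", "High")
--
--     if 23 in open_ports:
--         add("Telnet open (23) — plaintext credentials.", "Critical")
--
--     if 3389 in open_ports:
--         add("RDP open (3389) — verify NLA.", "High")
--
--     if 5900 in open_ports: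
--         add("VNC open (5900).", "High")
--
--     if 21 in open_ports:
--         add("FTP open (21) — insecure.", "Medium")
--
--     for p in (80, 8080, 443):
--         if p in open_ports:
--             banner = open_ports[p].get("banner", "")
--             if "Apache" in banner:
--                 add(f"Apache server detected ({banner}).", "Low")
--             elif "IIS" in banner:
--                 add(f"Microsoft IIS detected ({banner}).", "Medium")
--             elif "nginx" in banner.lower():
--                 add(f"nginx detected ({banner}).", "Low")
--
--     if 22 in open_ports:
--         banner = open_ports[22].get("banner", "")
--         if "OpenSSH_" in banner:
--             try:
--                 ver = banner.split("OpenSSH_")[1].split()[0]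
--                 major = int(ver.split(".")[0])
--                 if major < 7:
--                     add(f"Old OpenSSH version {ver}.", "Medium")
--                 else:
--                     add(f"OpenSSH detected {ver}.", "Low")
--             except:
--                 add("SSH detected.", "Low")
--
--     if not findings:
--         add("No obvious vulnerabilities detected.", "Info")
--
--     return findings
-- ===== SOURCE B (Python) =====
-- # B: instead of probing the dict with nine fixed-port membership tests in rule order,
-- # make ONE pass over open_ports.items(), classify each port into a (rank, finding)
-- # tag, then stable-sort the tags by rank to recover the report order.
--
-- RANK = {445: 0, 23: 1, 3389: 2, 5900: 3, 21: 4, 80: 5, 8080: 6, 443: 7, 22: 8}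
--
-- SIMPLE = {
--     445: ("SMB open (445) — possible SMBv1 risks.", "High"),
--     23: ("Telnet open (23) — plaintext credentials.", "Critical"),
--     3389: ("RDP open (3389) — verify NLA.", "High"),
--     5900: ("VNC open (5900).", "High"),
--     21: ("FTP open (21) — insecure.", "Medium"),
-- }
--
--
-- def _classify(port, info):
--     """Finding for one open port, or None."""
--     if port in SIMPLE:
--         desc, impact = SIMPLE[port]
--         return {"description": desc, "impact": impact}
--     if port in (80, 8080, 443):
--         banner = info.get("banner", "")
--         if "Apache" in banner:
--             return {"description": f"Apache server detected ({banner}).", "impact": "Low"}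
--         if "IIS" in banner:
--             return {"description": f"Microsoft IIS detected ({banner}).", "impact": "Medium"}
--         if "nginx" in banner.lower():
--             return {"description": f"nginx detected ({banner}).", "impact": "Low"}
--         return None
--     if port == 22:
--         banner = info.get("banner", "")
--         if "OpenSSH_" not in banner:
--             return None
--         words = banner.split("OpenSSH_")[1].split()
--         if not words:
--             return {"description": "SSH detected.", "impact": "Low"}
--         ver = words[0]
--         try:
--             major = int(ver.split(".")[0])
--         except ValueError:
--             return {"description": "SSH detected.", "impact": "Low"}
--         if major < 7:
--             return {"description": f"Old OpenSSH version {ver}.", "impact": "Medium"}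
--         return {"description": f"OpenSSH detected {ver}.", "impact": "Low"}
--     return None
--
--
-- def heuristic_flags(host_entry):
--     open_ports = host_entry.get("open_ports", {})
--     tagged = []
--     for port, info in open_ports.items():
--         if port in RANK:
--             finding = _classify(port, info)
--             if finding is not None:
--                 tagged.append((RANK[port], finding))
--     tagged.sort(key=lambda t: t[0])
--     findings = [f for _, f in tagged]
--     return findings or [{"description": "No obvious vulnerabilities detected.", "impact": "Info"}]
-- ===== Notes on version B (the rewrite author's own statement) =====
-- stated objective: alternative
-- what changed: A probes the open_ports dict with nine fixed-port membership tests emitted in report order; B inverts the traversal: one pass over open_ports.items() classifies each port into a (rank, finding) tag and a stable sort by rank recovers the report order.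
import Mathlib
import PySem

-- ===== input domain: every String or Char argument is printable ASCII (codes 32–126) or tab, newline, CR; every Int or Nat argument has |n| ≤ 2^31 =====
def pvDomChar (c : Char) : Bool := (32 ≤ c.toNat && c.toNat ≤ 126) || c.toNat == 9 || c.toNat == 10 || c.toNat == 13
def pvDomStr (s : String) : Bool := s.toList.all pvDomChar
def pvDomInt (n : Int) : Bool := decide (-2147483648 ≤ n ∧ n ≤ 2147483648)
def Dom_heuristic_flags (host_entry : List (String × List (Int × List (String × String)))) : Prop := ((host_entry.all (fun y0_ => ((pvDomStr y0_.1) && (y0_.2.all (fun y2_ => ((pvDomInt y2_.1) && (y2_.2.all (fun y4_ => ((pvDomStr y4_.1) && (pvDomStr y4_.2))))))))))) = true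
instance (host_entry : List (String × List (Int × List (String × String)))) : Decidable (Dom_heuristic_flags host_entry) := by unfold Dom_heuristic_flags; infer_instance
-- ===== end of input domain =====

-- B inverts the traversal: instead of nine fixed-port membership probes in report order,
-- it makes one pass over open_ports classifying each port into a (rank, finding) tag and
-- stable-sorts the tags by rank (objective: alternative).

-- ===== PORT A =====
-- add(desc, impact): appends one finding dict to the accumulating list
def pvAddA (findings : List (List (String × String))) (desc impact : String) :
    List (List (String × String)) :=
  findings ++ [[("description", desc), ("impact", impact)]]

-- one iteration of A's 'for p in (80, 8080, 443)' loop body over the accumulator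
def pvWebStepA (open_ports : List (Int × List (String × String)))
    (findings : List (List (String × String))) (p : Int) : List (List (String × String)) :=
  match List.lookup p open_ports with
  | none => findings
  | some d =>
    let banner := (List.lookup "banner" d).getD ""
    if PySem.Str.isIn "Apache" banner then
      pvAddA findings (PySem.Str.join "" ["Apache server detected (", banner, ")."]) "Low"
    else if PySem.Str.isIn "IIS" banner then
      pvAddA findings (PySem.Str.join "" ["Microsoft IIS detected (", banner, ")."]) "Medium"
    else if PySem.Str.isIn "nginx" (PySem.Str.lower banner) then
      pvAddA findings (PySem.Str.join "" ["nginx detected (", banner, ")."]) "Low"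
    else findings

-- A's trailing 'if 22 in open_ports' block; a [i]? = none or int() failure is the bare except
def pvSshBlockA (open_ports : List (Int × List (String × String)))
    (findings : List (List (String × String))) : List (List (String × String)) :=
  match List.lookup (22 : Int) open_ports with
  | none => findings
  | some d =>
    let banner := (List.lookup "banner" d).getD ""
    if PySem.Str.isIn "OpenSSH_" banner then
      match ((PySem.Str.split? banner "OpenSSH_").getD [])[1]? with
      | none => pvAddA findings "SSH detected." "Low"
      | some rest =>
        match (PySem.Str.split₀ rest)[0]? with
        | none => pvAddA findings "SSH detected." "Low"
        | some ver =>
          match PySem.Int.ofStr? (((PySem.Str.split? ver ".").getD [])[0]?.getD "") with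
          | none => pvAddA findings "SSH detected." "Low"
          | some major =>
            if major < 7 then
              pvAddA findings (PySem.Str.join "" ["Old OpenSSH version ", ver, "."]) "Medium"
            else
              pvAddA findings (PySem.Str.join "" ["OpenSSH detected ", ver, "."]) "Low"
    else findings

def heuristic_flags (host_entry : List (String × List (Int × List (String × String)))) :
    List (List (String × String)) :=
  let open_ports := (List.lookup "open_ports" host_entry).getD []
  let findings : List (List (String × String)) := []
  let findings := if (List.lookup (445 : Int) open_ports).isSome then
      pvAddA findings "SMB open (445) — possible SMBv1 risks." "High" else findings
  let findings := if (List.lookup (23 : Int) open_ports).isSome then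
      pvAddA findings "Telnet open (23) — plaintext credentials." "Critical" else findings
  let findings := if (List.lookup (3389 : Int) open_ports).isSome then
      pvAddA findings "RDP open (3389) — verify NLA." "High" else findings
  let findings := if (List.lookup (5900 : Int) open_ports).isSome then
      pvAddA findings "VNC open (5900)." "High" else findings
  let findings := if (List.lookup (21 : Int) open_ports).isSome then
      pvAddA findings "FTP open (21) — insecure." "Medium" else findings
  let findings := [(80 : Int), 8080, 443].foldl (pvWebStepA open_ports) findings
  let findings := pvSshBlockA open_ports findings
  if findings = [] then pvAddA [] "No obvious vulnerabilities detected." "Info" else findings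

-- ===== PORT B =====
-- RANK: port -> position in the report order
def pvRANK : List (Int × Int) :=
  [(445, 0), (23, 1), (3389, 2), (5900, 3), (21, 4), (80, 5), (8080, 6), (443, 7), (22, 8)]

-- SIMPLE: fixed finding text for the five membership-only ports
def pvSIMPLE : List (Int × (String × String)) :=
  [(445, ("SMB open (445) — possible SMBv1 risks.", "High")),
   (23, ("Telnet open (23) — plaintext credentials.", "Critical")),
   (3389, ("RDP open (3389) — verify NLA.", "High")),
   (5900, ("VNC open (5900).", "High")),
   (21, ("FTP open (21) — insecure.", "Medium"))]

-- _classify(port, info): finding for one open port, or None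
def pvClassifyB (port : Int) (info : List (String × String)) :
    Option (List (String × String)) :=
  match List.lookup port pvSIMPLE with
  | some di => some [("description", di.1), ("impact", di.2)]
  | none =>
    if [(80 : Int), 8080, 443].contains port then
      let banner := (List.lookup "banner" info).getD ""
      if PySem.Str.isIn "Apache" banner then
        some [("description", PySem.Str.join "" ["Apache server detected (", banner, ")."]), ("impact", "Low")]
      else if PySem.Str.isIn "IIS" banner then
        some [("description", PySem.Str.join "" ["Microsoft IIS detected (", banner, ")."]), ("impact", "Medium")]
      else if PySem.Str.isIn "nginx" (PySem.Str.lower banner) then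
        some [("description", PySem.Str.join "" ["nginx detected (", banner, ")."]), ("impact", "Low")]
      else none
    else if port == 22 then
      let banner := (List.lookup "banner" info).getD ""
      if PySem.Str.isIn "OpenSSH_" banner then
        let words := PySem.Str.split₀ (((PySem.Str.split? banner "OpenSSH_").getD [])[1]?.getD "")
        match words[0]? with
        | none => some [("description", "SSH detected."), ("impact", "Low")]
        | some ver =>
          match PySem.Int.ofStr? (((PySem.Str.split? ver ".").getD [])[0]?.getD "") with
          | none => some [("description", "SSH detected."), ("impact", "Low")]
          | some major =>
            if major < 7 then
              some [("description", PySem.Str.join "" ["Old OpenSSH version ", ver, "."]), ("impact", "Medium")]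
            else
              some [("description", PySem.Str.join "" ["OpenSSH detected ", ver, "."]), ("impact", "Low")]
      else none
    else none

def heuristic_flags_alt (host_entry : List (String × List (Int × List (String × String)))) :
    List (List (String × String)) :=
  let open_ports := (List.lookup "open_ports" host_entry).getD []
  -- one pass over open_ports.items(): tag each recognised port's finding with its rank
  let tagged := open_ports.foldl
    (fun acc pi =>
      match List.lookup pi.1 pvRANK with
      | none => acc
      | some r =>
        match pvClassifyB pi.1 pi.2 with
        | none => acc
        | some f => acc ++ [(r, f)])
    ([] : List (Int × List (String × String)))
  -- tagged.sort(key=lambda t: t[0]); findings = [f for _, f in tagged]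
  let findings := (PySem.List.sorted tagged (fun t => t.1) false).map Prod.snd
  if findings = [] then
    [[("description", "No obvious vulnerabilities detected."), ("impact", "Info")]]
  else findings

-- ===== PRECONDITION & SPEC =====
-- Pre_ excludes association-list encodings whose open_ports value repeats a port key:
-- those do not arise from a Python dict (dict keys are unique), and on them the
-- first-match lookup order A's probes use is not B's single-pass order.
def Pre_heuristic_flags (host_entry : List (String × List (Int × List (String × String)))) : Prop :=
  ((((List.lookup "open_ports" host_entry).getD []).map Prod.fst).Nodup)
instance (host_entry : List (String × List (Int × List (String × String)))) : Decidable (Pre_heuristic_flags host_entry) := by unfold Pre_heuristic_flags; infer_instance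

def pvWitness_heuristic_flags : (List (String × List (Int × List (String × String)))) :=
  [("open_ports", [((22 : Int), [("banner", "OpenSSH_7.4")]), ((23 : Int), [])])]

def Spec_heuristic_flags (host_entry : List (String × List (Int × List (String × String)))) (out : List (List (String × String))) : Prop := out = heuristic_flags_alt host_entry
instance (host_entry : List (String × List (Int × List (String × String)))) (out : List (List (String × String))) : Decidable (Spec_heuristic_flags host_entry out) := by unfold Spec_heuristic_flags; infer_instance

-- ===== CLAIM (what is proved, stated in full; the proofs are below) =====
def Claim_equal_heuristic_flags : Prop := ∀ (host_entry : List (String × List (Int × List (String × String)))), Dom_heuristic_flags host_entry → Pre_heuristic_flags host_entry → Spec_heuristic_flags host_entry (heuristic_flags host_entry)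

-- ===== LEMMAS AND PROOFS =====

-- the nine recognised ports in report order (= keys of pvRANK)
def pvPorts : List Int := [445, 23, 3389, 5900, 21, 80, 8080, 443, 22]

-- B's per-item tag contribution
def pvGB (pi : Int × List (String × String)) : List (Int × List (String × String)) :=
  match List.lookup pi.1 pvRANK with
  | none => []
  | some r => match pvClassifyB pi.1 pi.2 with | none => [] | some f => [(r, f)]

-- the tags of port p, read off via lookup (report-order view)
def pvTagAt (ops : List (Int × List (String × String))) (p : Int) :
    List (Int × List (String × String)) :=
  match List.lookup p ops with
  | none => []
  | some d => pvGB (p, d)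

def pvTarget (ops : List (Int × List (String × String))) :
    List (Int × List (String × String)) :=
  pvPorts.flatMap (pvTagAt ops)

-- A's web loop contribution per port / SSH contribution (canonical forms)
def pvWebFindingsB (open_ports : List (Int × List (String × String))) (p : Int) :
    List (List (String × String)) :=
  match List.lookup p open_ports with
  | none => []
  | some d =>
    let banner := (List.lookup "banner" d).getD ""
    if PySem.Str.isIn "Apache" banner then
      [[("description", PySem.Str.join "" ["Apache server detected (", banner, ")."]), ("impact", "Low")]]
    else if PySem.Str.isIn "IIS" banner then
      [[("description", PySem.Str.join "" ["Microsoft IIS detected (", banner, ")."]), ("impact", "Medium")]]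
    else if PySem.Str.isIn "nginx" (PySem.Str.lower banner) then
      [[("description", PySem.Str.join "" ["nginx detected (", banner, ")."]), ("impact", "Low")]]
    else []

def pvSshFindingsB (open_ports : List (Int × List (String × String))) :
    List (List (String × String)) :=
  match List.lookup (22 : Int) open_ports with
  | none => []
  | some d =>
    let banner := (List.lookup "banner" d).getD ""
    if PySem.Str.isIn "OpenSSH_" banner then
      match ((PySem.Str.split? banner "OpenSSH_").getD [])[1]? with
      | none => [[("description", "SSH detected."), ("impact", "Low")]]
      | some rest =>
        match (PySem.Str.split₀ rest)[0]? with
        | none => [[("description", "SSH detected."), ("impact", "Low")]]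
        | some ver =>
          match PySem.Int.ofStr? (((PySem.Str.split? ver ".").getD [])[0]?.getD "") with
          | none => [[("description", "SSH detected."), ("impact", "Low")]]
          | some major =>
            if major < 7 then
              [[("description", PySem.Str.join "" ["Old OpenSSH version ", ver, "."]), ("impact", "Medium")]]
            else
              [[("description", PySem.Str.join "" ["OpenSSH detected ", ver, "."]), ("impact", "Low")]]
    else []

theorem pvWebStepA_eq (open_ports : List (Int × List (String × String)))
    (f : List (List (String × String))) (p : Int) :
    pvWebStepA open_ports f p = f ++ pvWebFindingsB open_ports p := by
  unfold pvWebStepA pvWebFindingsB pvAddA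
  cases List.lookup p open_ports with
  | none => simp
  | some d => dsimp only; split_ifs <;> simp

theorem pvSshBlockA_eq (open_ports : List (Int × List (String × String)))
    (f : List (List (String × String))) :
    pvSshBlockA open_ports f = f ++ pvSshFindingsB open_ports := by
  unfold pvSshBlockA pvSshFindingsB pvAddA
  cases List.lookup (22 : Int) open_ports with
  | none => simp
  | some d =>
    dsimp only
    split_ifs with h
    · cases h1 : ((PySem.Str.split? ((List.lookup "banner" d).getD "") "OpenSSH_").getD [])[1]? with
      | none => simp
      | some rest =>
        dsimp only
        cases h2 : (PySem.Str.split₀ rest)[0]? with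
        | none => rfl
        | some ver =>
          dsimp only
          cases h3 : PySem.Int.ofStr? (((PySem.Str.split? ver ".").getD [])[0]?.getD "") with
          | none => rfl
          | some major => dsimp only; split_ifs <;> rfl
    · simp


-- B's foldl body appends exactly pvGB's contribution
theorem pv_tagged_eq (ops : List (Int × List (String × String))) :
    ops.foldl
      (fun acc pi =>
        match List.lookup pi.1 pvRANK with
        | none => acc
        | some r =>
          match pvClassifyB pi.1 pi.2 with
          | none => acc
          | some f => acc ++ [(r, f)])
      ([] : List (Int × List (String × String))) = ops.flatMap pvGB := by
  have hbody : (fun (acc : List (Int × List (String × String))) (pi : Int × List (String × String)) =>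
      match List.lookup pi.1 pvRANK with
      | none => acc
      | some r =>
        match pvClassifyB pi.1 pi.2 with
        | none => acc
        | some f => acc ++ [(r, f)]) = (fun acc pi => acc ++ pvGB pi) := by
    funext acc pi
    unfold pvGB
    cases List.lookup pi.1 pvRANK with
    | none => simp
    | some r =>
      cases pvClassifyB pi.1 pi.2 with
      | none => simp
      | some f => rfl
  rw [hbody, PySem.List.foldl_append_eq_flatMap]
  simp

-- a port outside the table has no rank
theorem pv_rank_none (p : Int) (h : p ∉ pvPorts) : List.lookup p pvRANK = none := by
  simp only [pvPorts, List.mem_cons, not_or] at h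
  apply List.lookup_eq_none_iff.mpr
  intro q hq
  fin_cases hq <;> simp [bne_iff_ne] <;> omega

-- replacing g by f at a single position p of a duplicate-free list permutes one block to the front
theorem pv_flatMap_update {α β : Type} [DecidableEq α] (L : List α) (f g : α → List β) (p : α)
    (hnd : L.Nodup) (hne : ∀ q ∈ L, q ≠ p → f q = g q) (hp : g p = []) :
    (L.flatMap f).Perm ((if p ∈ L then f p else []) ++ L.flatMap g) := by
  induction L with
  | nil => simp
  | cons a t ih =>
    rw [List.nodup_cons] at hnd
    by_cases hap : a = p
    · subst hap
      have hft : t.flatMap f = t.flatMap g :=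
        List.flatMap_congr (fun q hq => hne q (List.mem_cons_of_mem _ hq)
          (fun e => hnd.1 (e ▸ hq)))
      simp [hp, hft]
    · have hfa : f a = g a := hne a (List.mem_cons_self) hap
      have ihp := ih hnd.2 (fun q hq => hne q (List.mem_cons_of_mem _ hq))
      have step1 : ((a :: t).flatMap f) = f a ++ t.flatMap f := by simp
      rw [step1]
      refine ((ihp.append_left (f a)).trans ?_)
      refine (List.perm_append_comm_assoc (f a) (if p ∈ t then f p else [])
        (t.flatMap g)).trans ?_
      simp [List.mem_cons, Ne.symm hap, hfa]

-- one open_ports pass, read off in report order: the tag lists are permutations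
theorem pv_target_perm (ops : List (Int × List (String × String)))
    (h : (ops.map Prod.fst).Nodup) : (pvTarget ops).Perm (ops.flatMap pvGB) := by
  induction ops with
  | nil =>
    have : pvTarget [] = [] := rfl
    rw [this]; rfl
  | cons pd rest ih =>
    obtain ⟨p, d⟩ := pd
    rw [List.map_cons, List.nodup_cons] at h
    have hlook : List.lookup p rest = none := by
      apply List.lookup_eq_none_iff.mpr
      intro q hq
      simp only [bne_iff_ne]
      exact fun e => h.1 (List.mem_map.mpr ⟨q, hq, e.symm⟩)
    have hgrest : pvTagAt rest p = [] := by simp [pvTagAt, hlook]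
    have hne : ∀ q ∈ pvPorts, q ≠ p → pvTagAt ((p, d) :: rest) q = pvTagAt rest q := by
      intro q _ hq
      have hb : (q == p) = false := by simpa using hq
      simp [pvTagAt, List.lookup, hb]
    have hupd := pv_flatMap_update pvPorts (pvTagAt ((p, d) :: rest)) (pvTagAt rest) p
      (by decide) hne hgrest
    have hx : (if p ∈ pvPorts then pvTagAt ((p, d) :: rest) p else []) = pvGB (p, d) := by
      by_cases hm : p ∈ pvPorts
      · simp [hm, pvTagAt, List.lookup]
      · simp [hm, pvGB, pv_rank_none p hm]
    refine (hupd.trans ?_)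
    rw [hx]
    exact (ih h.2).append_left _

-- every tag of port p carries p's rank
theorem pv_tagAt_fst (ops : List (Int × List (String × String))) (p : Int) :
    ∀ x ∈ pvTagAt ops p, x.1 = (List.lookup p pvRANK).getD 0 := by
  intro x hx
  unfold pvTagAt pvGB at hx
  cases hop : List.lookup p ops with
  | none => rw [hop] at hx; simp at hx
  | some d =>
    rw [hop] at hx
    dsimp only at hx
    cases hr : List.lookup p pvRANK with
    | none => rw [hr] at hx; simp at hx
    | some r =>
      rw [hr] at hx
      cases hc : pvClassifyB p d with
      | none => rw [hc] at hx; simp at hx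
      | some f =>
        rw [hc] at hx
        simp at hx
        simp [hx]

theorem pv_target_pairwise (ops : List (Int × List (String × String))) :
    (pvTarget ops).Pairwise (fun a b => a.1 < b.1) := by
  rw [pvTarget, List.pairwise_flatMap]
  constructor
  · intro p _
    unfold pvTagAt pvGB
    split
    · exact List.Pairwise.nil
    · split
      · exact List.Pairwise.nil
      · split
        · exact List.Pairwise.nil
        · simp
  · have hpp : pvPorts.Pairwise
        (fun p q => (List.lookup p pvRANK).getD 0 < (List.lookup q pvRANK).getD 0) := by decide
    exact hpp.imp (fun hpq x hx y hy => by
      rw [pv_tagAt_fst ops _ x hx, pv_tagAt_fst ops _ y hy]; exact hpq)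

theorem pv_sorted_eq (ops : List (Int × List (String × String)))
    (h : (ops.map Prod.fst).Nodup) :
    PySem.List.sorted (ops.flatMap pvGB) (fun t => t.1) false = pvTarget ops :=
  PySem.List.sorted_eq_of_perm_of_pairwise_lt _ _ _ (pv_target_perm ops h)
    (pv_target_pairwise ops)

-- report-order reads of the tags coincide with A's per-port contributions
theorem pv_snd_simple (ops : List (Int × List (String × String))) (p r : Int)
    (desc imp : String) (h1 : List.lookup p pvRANK = some r)
    (h2 : List.lookup p pvSIMPLE = some (desc, imp)) :
    (pvTagAt ops p).map Prod.snd =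
      if (List.lookup p ops).isSome then [[("description", desc), ("impact", imp)]] else [] := by
  unfold pvTagAt pvGB pvClassifyB
  cases List.lookup p ops <;> simp [h1, h2]

theorem pv_snd_web (ops : List (Int × List (String × String))) (p r : Int)
    (h1 : List.lookup p pvRANK = some r) (h2 : List.lookup p pvSIMPLE = none)
    (h3 : [(80 : Int), 8080, 443].contains p = true) :
    (pvTagAt ops p).map Prod.snd = pvWebFindingsB ops p := by
  unfold pvTagAt pvGB pvClassifyB pvWebFindingsB
  cases List.lookup p ops with
  | none => simp
  | some d =>
    simp only [h1, h2, h3, if_true]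
    split_ifs <;> simp

theorem pv_snd_ssh (ops : List (Int × List (String × String))) :
    (pvTagAt ops 22).map Prod.snd = pvSshFindingsB ops := by
  unfold pvTagAt pvGB pvClassifyB pvSshFindingsB
  cases List.lookup (22 : Int) ops with
  | none => simp
  | some d =>
    have hr : List.lookup (22 : Int) pvRANK = some 8 := rfl
    have hs : List.lookup (22 : Int) pvSIMPLE = none := rfl
    simp only [hr, hs, show ([(80 : Int), 8080, 443].contains 22) = false from rfl,
      show ((22 : Int) == 22) = true from rfl, Bool.false_eq_true, if_false, if_true]
    split_ifs with hb
    · cases h1 : ((PySem.Str.split? ((List.lookup "banner" d).getD "") "OpenSSH_").getD [])[1]? with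
      | none => simp [h1]; exact ⟨8, rfl⟩
      | some rest =>
        simp only [h1, Option.getD_some]
        cases h2 : (PySem.Str.split₀ rest)[0]? with
        | none => simp [h2]
        | some ver =>
          simp only [h2]
          cases h3 : PySem.Int.ofStr? (((PySem.Str.split? ver ".").getD [])[0]?.getD "") with
          | none => simp [h3]
          | some major => simp only [h3]; split_ifs <;> simp
    · simp [hb]

-- ===== VERDICT (by name: the statement is the Claim_ definition above) =====
theorem heuristic_flags_spec : Claim_equal_heuristic_flags := by
  intro he _ hpre
  unfold Pre_heuristic_flags at hpre
  show heuristic_flags he = heuristic_flags_alt he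
  simp only [heuristic_flags, heuristic_flags_alt]
  generalize hops : (List.lookup "open_ports" he).getD [] = ops
  rw [hops] at hpre
  rw [pv_tagged_eq ops, pv_sorted_eq ops hpre]
  have key : ∀ (A B : List (List (String × String))),
      A = B →
      (if A = [] then [[("description", "No obvious vulnerabilities detected."), ("impact", "Info")]] else A) =
      (if B = [] then [[("description", "No obvious vulnerabilities detected."), ("impact", "Info")]] else B) :=
    fun A B h => by rw [h]
  apply key
  rw [pvTarget]
  simp only [pvPorts, List.flatMap_cons, List.flatMap_nil, List.append_nil, List.map_append]
  rw [pv_snd_simple ops 445 0 _ _ rfl rfl, pv_snd_simple ops 23 1 _ _ rfl rfl,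
    pv_snd_simple ops 3389 2 _ _ rfl rfl, pv_snd_simple ops 5900 3 _ _ rfl rfl,
    pv_snd_simple ops 21 4 _ _ rfl rfl, pv_snd_web ops 80 5 rfl rfl rfl,
    pv_snd_web ops 8080 6 rfl rfl rfl, pv_snd_web ops 443 7 rfl rfl rfl, pv_snd_ssh ops]
  simp only [List.foldl, pvWebStepA_eq, pvSshBlockA_eq, List.append_assoc]
  by_cases h1 : (List.lookup (445 : Int) ops).isSome <;>
    by_cases h2 : (List.lookup (23 : Int) ops).isSome <;>
      by_cases h3 : (List.lookup (3389 : Int) ops).isSome <;>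
        by_cases h4 : (List.lookup (5900 : Int) ops).isSome <;>
          by_cases h5 : (List.lookup (21 : Int) ops).isSome <;>
            simp [h1, h2, h3, h4, h5, pvAddA]
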